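-- pv_equiv track=rewrite | github.com/Marvan-IT/ADAPTIVE-LEARNER | backend/scripts/preview_sections.py | assign_images_to_sections
-- ===== SOURCE A (Python) =====
-- def assign_images_to_sections(images: list[dict], n: int) -> list[list[dict]]:
--     """Split images into n roughly equal buckets (in document order)."""
--     buckets: list[list[dict]] = [[] for _ in range(n)]
--     if not images:
--         return buckets
--     chunk = max(1, len(images) // n)
--     for i, img in enumerate(images):
--         bucket_idx = min(i // chunk, n - 1)
--         buckets[bucket_idx].append(img)
--     return buckets
-- ===== SOURCE B (Python) =====
-- def assign_images_to_sections(images: list[dict], n: int) -> list[list[dict]]: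
--     """Split images into n roughly equal buckets (in document order)."""
--     if not images:
--         return [[] for _ in range(n)]
--     chunk = max(1, len(images) // n)
--     buckets = [images[j * chunk:(j + 1) * chunk] for j in range(n - 1)]
--     buckets.append(images[(n - 1) * chunk:])
--     return buckets
-- ===== Notes on version B (the rewrite author's own statement) =====
-- stated objective: simpler
-- what changed: B computes each bucket directly as a slice images[j*chunk:(j+1)*chunk] (last bucket takes the tail), instead of A's per-image loop that appends each image to bucket min(i//chunk, n-1).
import Mathlib
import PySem

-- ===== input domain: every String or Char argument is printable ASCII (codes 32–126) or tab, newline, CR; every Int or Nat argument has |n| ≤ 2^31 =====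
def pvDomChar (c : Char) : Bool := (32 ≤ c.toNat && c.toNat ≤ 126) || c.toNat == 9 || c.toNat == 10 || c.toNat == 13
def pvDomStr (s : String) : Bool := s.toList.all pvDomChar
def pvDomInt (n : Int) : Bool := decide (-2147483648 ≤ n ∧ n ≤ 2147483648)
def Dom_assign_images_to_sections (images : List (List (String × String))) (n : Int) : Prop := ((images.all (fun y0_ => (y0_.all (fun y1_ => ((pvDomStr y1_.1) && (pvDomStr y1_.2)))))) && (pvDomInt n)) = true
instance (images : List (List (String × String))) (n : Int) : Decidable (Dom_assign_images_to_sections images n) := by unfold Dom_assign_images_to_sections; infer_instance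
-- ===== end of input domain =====

-- B replaces A's per-element bucket assignment with direct slice boundaries (one slice per bucket); objective: simpler.


-- ===== PORT A =====
-- literal port of A: build n empty buckets, then append each image to bucket min(i // chunk, n-1).
-- idx.toNat is exact on Pre_ (there n ≥ 1, so idx ≥ 0); the negative-index wraparound Python would
-- perform for n ≤ 0 hits an empty bucket list and raises IndexError, which Pre_ excludes.
def assign_images_to_sections (images : List (List (String × String))) (n : Int) : List (List (List (String × String))) :=
  let buckets : List (List (List (String × String))) := List.replicate n.toNat []
  if images.isEmpty then buckets
  else
    let chunk : Int := max 1 (PySem.Int.floordiv (images.length : Int) n)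
    (PySem.List.enumerate images).foldl
      (fun bs p => bs.modify (min (PySem.Int.floordiv p.1 chunk) (n - 1)).toNat (fun b => b ++ [p.2]))
      buckets

-- ===== PORT B =====
-- literal port of B: bucket j is the slice images[j*chunk:(j+1)*chunk], the last bucket absorbs the tail.
def assign_images_to_sections_alt (images : List (List (String × String))) (n : Int) : List (List (List (String × String))) :=
  if images.isEmpty then List.replicate n.toNat []
  else
    let chunk : Int := max 1 (PySem.Int.floordiv (images.length : Int) n)
    let buckets := (PySem.List.pyRange 0 (n - 1) 1).map
      (fun j => PySem.List.slice images (some (j * chunk)) (some ((j + 1) * chunk)))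
    buckets ++ [PySem.List.slice images (some ((n - 1) * chunk)) none]

-- ===== PRECONDITION & SPEC =====
-- Pre_ excludes exactly the inputs where Python A raises: nonempty images with n ≤ 0
-- (n = 0 → ZeroDivisionError, n < 0 → IndexError on the empty bucket list).
def Pre_assign_images_to_sections (images : List (List (String × String))) (n : Int) : Prop :=
  images = [] ∨ 1 ≤ n
instance (images : List (List (String × String))) (n : Int) : Decidable (Pre_assign_images_to_sections images n) := by unfold Pre_assign_images_to_sections; infer_instance

def pvWitness_assign_images_to_sections : (List (List (String × String))) × Int :=
  ([[("src", "a.png")], [("src", "b.png")], [("src", "c.png")]], 2)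

def Spec_assign_images_to_sections (images : List (List (String × String))) (n : Int) (out : List (List (List (String × String)))) : Prop := out = assign_images_to_sections_alt images n
instance (images : List (List (String × String))) (n : Int) (out : List (List (List (String × String)))) : Decidable (Spec_assign_images_to_sections images n out) := by unfold Spec_assign_images_to_sections; infer_instance

-- ===== CLAIM (what is proved, stated in full; the proofs are below) =====
def Claim_equal_assign_images_to_sections : Prop := ∀ (images : List (List (String × String))) (n : Int), Dom_assign_images_to_sections images n → Pre_assign_images_to_sections images n → Spec_assign_images_to_sections images n (assign_images_to_sections images n)

-- ===== LEMMAS AND PROOFS =====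

-- bucket j of the distributing fold = its initial content ++ the elements routed to j, in order
theorem pv_foldl_modify_getElem? {α : Type} (g : Int → Nat) (l : List (Int × α)) :
    ∀ (bs : List (List α)) (j : Nat),
      (l.foldl (fun bs p => bs.modify (g p.1) (fun b => b ++ [p.2])) bs)[j]? =
        (bs[j]?).map (fun b => b ++ (l.filter (fun p => g p.1 == j)).map (fun p => p.2)) := by
  induction l with
  | nil => intro bs j; cases h : bs[j]? <;> simp [h]
  | cons p l ih =>
    intro bs j
    simp only [List.foldl_cons, List.filter_cons]
    rw [ih, List.getElem?_modify]
    by_cases h : g p.1 = j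
    · cases hbs : bs[j]? <;> simp [h]
    · have h' : (g p.1 == j) = false := by simp [h]
      cases hbs : bs[j]? <;> simp [h, h']

-- filtering a contiguous index window out of an enumeration is a take/drop
theorem pv_filter_enum_interval {α : Type} (a b : Nat) (l : List α) :
    ∀ (s : Nat),
      ((PySem.List.enumerate l (s : Int)).filter
          (fun p => decide ((a : Int) ≤ p.1) && decide (p.1 < (b : Int)))).map (fun p => p.2)
        = (l.take (b - s)).drop (a - s) := by
  induction l with
  | nil => intro s; simp [PySem.List.enumerate_nil]
  | cons x l ih =>
    intro s
    rw [PySem.List.enumerate_cons]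
    have hcast : (s : Int) + 1 = ((s + 1 : Nat) : Int) := by push_cast; ring
    rw [hcast, List.filter_cons]
    by_cases ha : a ≤ s
    · by_cases hb : s < b
      · have hcond : ((decide ((a : Int) ≤ (s : Int)) && decide ((s : Int) < (b : Int))) = true) := by
          simp; omega
        simp only [hcond, if_true, List.map_cons, ih]
        have h1 : b - s = (b - (s + 1)) + 1 := by omega
        have h2 : a - s = 0 := by omega
        have h3 : a - (s + 1) = 0 := by omega
        rw [h1, h2, h3, List.take_succ_cons, List.drop_zero, List.drop_zero]
      · have hcond : ((decide ((a : Int) ≤ (s : Int)) && decide ((s : Int) < (b : Int))) = false) := by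
          simp; omega
        simp only [hcond, if_false, ih, Bool.false_eq_true]
        have h1 : b - s = 0 := by omega
        have h2 : b - (s + 1) = 0 := by omega
        simp [h1, h2]
    · have hcond : ((decide ((a : Int) ≤ (s : Int)) && decide ((s : Int) < (b : Int))) = false) := by
        simp; omega
      simp only [hcond, if_false, ih, Bool.false_eq_true]
      by_cases hb : s < b
      · have h1 : b - s = (b - (s + 1)) + 1 := by omega
        have h2 : a - s = (a - (s + 1)) + 1 := by omega
        rw [h1, h2, List.take_succ_cons, List.drop_succ_cons]
      · have h1 : b - s = 0 := by omega
        have h2 : b - (s + 1) = 0 := by omega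
        simp [h1, h2]

-- min(k/c, m) = j unfolded into the window bounds
theorem pv_min_div_eq_iff (k c m j : Nat) (hc : 0 < c) (hj : j ≤ m) :
    (min (k / c) m = j) ↔ (if j < m then j * c ≤ k ∧ k < (j + 1) * c else m * c ≤ k) := by
  have h1 : j ≤ k / c ↔ j * c ≤ k := Nat.le_div_iff_mul_le hc
  have h2 : k / c < j + 1 ↔ k < (j + 1) * c := Nat.div_lt_iff_lt_mul hc
  have h3 : m ≤ k / c ↔ m * c ≤ k := Nat.le_div_iff_mul_le hc
  split_ifs with hlt
  · constructor
    · intro h; exact ⟨h1.mp (by omega), h2.mp (by omega)⟩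
    · intro ⟨hl, hr⟩
      have := h1.mpr hl
      have := h2.mpr hr
      omega
  · constructor
    · intro h; exact h3.mp (by omega)
    · intro h
      have := h3.mpr h
      omega

theorem assign_main : ∀ (images : List (List (String × String))) (n : Int),
    Pre_assign_images_to_sections images n →
    assign_images_to_sections images n = assign_images_to_sections_alt images n := by
  intro l n hpre
  by_cases hemp : l.isEmpty
  · simp [assign_images_to_sections, assign_images_to_sections_alt, hemp]
  · have hne : l ≠ [] := by simpa [List.isEmpty_iff] using hemp
    have hn : 1 ≤ n := by
      rcases hpre with h | h
      · exact absurd h hne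
      · exact h
    -- names for the numeric data
    set c : Int := max 1 (PySem.Int.floordiv (l.length : Int) n) with hc
    have hc1 : 1 ≤ c := le_max_left _ _
    obtain ⟨cN, hcN⟩ : ∃ cN : Nat, c = (cN : Int) := ⟨c.toNat, by omega⟩
    have hcN1 : 1 ≤ cN := by omega
    obtain ⟨m, hm⟩ : ∃ m : Nat, n = (m : Int) + 1 := ⟨(n - 1).toNat, by omega⟩
    have hn1 : n - 1 = (m : Int) := by omega
    have hnN : n.toNat = m + 1 := by omega
    -- unfold both ports
    rw [assign_images_to_sections, assign_images_to_sections_alt]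
    simp only [hemp, if_false, Bool.false_eq_true, ← hc, hnN]
    apply List.ext_getElem?
    intro j
    rw [pv_foldl_modify_getElem? (fun i => (min (PySem.Int.floordiv i c) (n - 1)).toNat)]
    -- B-side bucket list length
    have hblen : ((PySem.List.pyRange 0 (n - 1) 1).map
        (fun j => PySem.List.slice l (some (j * c)) (some ((j + 1) * c)))).length = m := by
      simp [PySem.List.length_pyRange_one, hn1]
    by_cases hjm : j < m + 1
    · -- bucket j exists on both sides
      have hrep : (List.replicate (m + 1) ([] : List (List (String × String))))[j]? = some [] := by
        simp [hjm]
      rw [hrep]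
      simp only [Option.map_some, List.nil_append]
      -- rewrite A's filter into the contiguous-window predicate
      have hfc : (PySem.List.enumerate l).filter
            (fun p => (fun i => (min (PySem.Int.floordiv i c) (n - 1)).toNat) p.1 == j)
          = (PySem.List.enumerate l).filter
            (fun p => decide ((((if j < m then j * cN else m * cN) : Nat) : Int) ≤ p.1) &&
                      decide (p.1 < ((((if j < m then (j + 1) * cN else l.length) : Nat) : Int)))) := by
        apply List.filter_congr
        intro p hp
        rcases (PySem.List.mem_enumerate_iff _ _ _).mp hp with ⟨k, hk, hpk⟩
        subst hpk
        simp only [zero_add]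
        rw [hcN, PySem.Int.floordiv_natCast, hn1]
        have hmin : (min ((k / cN : Nat) : Int) ((m : Nat) : Int)).toNat = min (k / cN) m := by
          rw [← Nat.cast_min]; exact Int.toNat_natCast _
        rw [hmin]
        have := pv_min_div_eq_iff k cN m j (by omega) (by omega)
        by_cases hlt : j < m
        · simp only [hlt, if_true] at this ⊢
          rw [Bool.eq_iff_iff]
          simp only [beq_iff_eq, Bool.and_eq_true, decide_eq_true_eq]
          rw [this]
          constructor
          · intro ⟨h1, h2⟩; exact ⟨by exact_mod_cast h1, by exact_mod_cast h2⟩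
          · intro ⟨h1, h2⟩; exact ⟨by exact_mod_cast h1, by exact_mod_cast h2⟩
        · simp only [hlt, if_false] at this ⊢
          rw [Bool.eq_iff_iff]
          simp only [beq_iff_eq, Bool.and_eq_true, decide_eq_true_eq]
          rw [this]
          constructor
          · intro h1; exact ⟨by exact_mod_cast h1, by exact_mod_cast hk⟩
          · intro ⟨h1, _⟩; exact by exact_mod_cast h1
      rw [hfc]
      have henum0 : (PySem.List.enumerate l) = PySem.List.enumerate l ((0 : Nat) : Int) := by norm_num
      rw [henum0, pv_filter_enum_interval]
      simp only [Nat.sub_zero]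
      -- now compute B's j-th entry
      by_cases hlt : j < m
      · have hBj : (((PySem.List.pyRange 0 (n - 1) 1).map
            (fun j => PySem.List.slice l (some (j * c)) (some ((j + 1) * c)))) ++
              [PySem.List.slice l (some ((n - 1) * c)) none])[j]? =
            some (PySem.List.slice l (some ((j : Int) * c)) (some (((j : Int) + 1) * c))) := by
          rw [List.getElem?_append_left (by omega)]
          simp only [List.getElem?_map, PySem.List.getElem?_pyRange_one]
          have h2 : j < (n - 1 - 0).toNat := by omega
          simp only [h2, if_true]
          norm_num
        rw [hBj]
        have e1 : (j : Int) * c = ((j * cN : Nat) : Int) := by rw [hcN]; push_cast; ring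
        have e2 : ((j : Int) + 1) * c = (((j + 1) * cN : Nat) : Int) := by rw [hcN]; push_cast; ring
        rw [e1, e2, PySem.List.slice_natCast]
        simp only [hlt, if_true]
        rw [List.drop_take]
      · have hjeq : j = m := by omega
        have hBj : (((PySem.List.pyRange 0 (n - 1) 1).map
            (fun j => PySem.List.slice l (some (j * c)) (some ((j + 1) * c)))) ++
              [PySem.List.slice l (some ((n - 1) * c)) none])[j]? =
            some (PySem.List.slice l (some ((n - 1) * c)) none) := by
          rw [List.getElem?_append_right (by omega)]
          simp [hblen, hjeq]
        rw [hBj]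
        have e1 : (n - 1) * c = ((m * cN : Nat) : Int) := by rw [hcN, hn1]; push_cast; ring
        rw [e1, PySem.List.slice_from_natCast]
        simp only [hlt, if_false]
        rw [List.take_length]
    · -- beyond the buckets: both sides are none
      have hA : (List.replicate (m + 1) ([] : List (List (String × String))))[j]? = none := by
        simp [List.getElem?_replicate]; omega
      rw [hA]
      have hB : (((PySem.List.pyRange 0 (n - 1) 1).map
          (fun j => PySem.List.slice l (some (j * c)) (some ((j + 1) * c)))) ++
            [PySem.List.slice l (some ((n - 1) * c)) none])[j]? = none := by
        rw [List.getElem?_eq_none]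
        simp only [List.length_append, hblen, List.length_cons, List.length_nil]
        omega
      rw [hB]
      rfl

-- ===== VERDICT (by name: the statement is the Claim_ definition above) =====
theorem assign_images_to_sections_spec : Claim_equal_assign_images_to_sections := by
  intro images n _ hpre
  unfold Spec_assign_images_to_sections
  exact assign_main images n hpre
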